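-- pv_equiv track=rewrite | github.com/Jemraider21-SDEV-330-Secure-Python-Apps/SDEV-300-Week-4-Assignment | Utils/Matrix/matrixutils.py | display_matrix
-- ===== SOURCE A (Python) =====
-- def display_matrix(matrix: list[int]) -> str:
--     """Prints the matrix out to the console in the correct format
--
--     Args:
--         matrix (list[int]): One dimensional matrix array
--         Ex: [1, 2, 3, ...]
--
--     Returns:
--         str: String representation of the matrix in grid form
--     """
--     output: str = ""
--     index = 1
--     for num in matrix:
--         output = f'{output} {num}'
--         if index == 3:
--             output = output + "\n"
--             index = 0
--         index = index + 1
--     return output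
-- ===== SOURCE B (Python) =====
-- def display_matrix(matrix: list[int]) -> str:
--     """Chunk the input into groups of three and format each group as a row;
--     a newline is appended only to full groups; the rows are joined."""
--     rows = []
--     for i in range(0, len(matrix), 3):
--         group = matrix[i:i+3]
--         row = ''.join(f' {n}' for n in group)
--         if len(group) == 3:
--             row += '\n'
--         rows.append(row)
--     return ''.join(rows)
-- ===== Notes on version B (the rewrite author's own statement) =====
-- stated objective: alternative
-- what changed: Replaced A's flat counter-driven loop that rebuilds the whole output string with an f-string each step by an index loop over range(0, len, 3) that slices each group of three, formats it as a row (newline only on full groups) and joins the rows once at the end.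
import Mathlib
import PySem

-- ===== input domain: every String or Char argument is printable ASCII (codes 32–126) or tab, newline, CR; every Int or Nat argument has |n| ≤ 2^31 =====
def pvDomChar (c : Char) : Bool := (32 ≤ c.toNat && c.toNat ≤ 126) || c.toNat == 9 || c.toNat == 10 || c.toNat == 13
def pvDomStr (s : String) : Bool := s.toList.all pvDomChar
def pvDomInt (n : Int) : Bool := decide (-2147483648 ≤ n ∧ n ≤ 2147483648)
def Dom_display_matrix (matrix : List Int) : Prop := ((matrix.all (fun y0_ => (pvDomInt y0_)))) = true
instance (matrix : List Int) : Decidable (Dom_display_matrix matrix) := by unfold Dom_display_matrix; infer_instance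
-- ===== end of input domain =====

-- B replaces A's flat counter-driven loop (which rebuilds the whole output string each step)
-- by chunking into groups of three and joining the formatted rows once.

-- ===== PORT A =====
-- flat loop over the elements carrying (output, index); index cycles 1,2,3, '\n' after each 3rd
def display_matrix (matrix : List Int) : String :=
  (matrix.foldl
    (fun (st : String × Int) num =>
      let output := st.1 ++ " " ++ PySem.Int.toStr num
      let (output, index) :=
        if st.2 = 3 then (output ++ "\n", (0 : Int)) else (output, st.2)
      (output, index + 1))
    ("", 1)).1

-- ===== PORT B =====
-- for i in range(0, len(matrix), 3): group = matrix[i:i+3]; row = ''.join(f' {n}' for n in group);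
-- if len(group) == 3: row += '\n'; rows.append(row); return ''.join(rows)
def display_matrix_alt (matrix : List Int) : String :=
  let rows := (PySem.List.pyRange 0 (matrix.length : Int) 3).foldl
    (fun (rows : List String) i =>
      let group := PySem.List.slice matrix (some i) (some (i + 3))
      let row := String.join (group.map (fun n => " " ++ PySem.Int.toStr n))
      let row := if group.length = 3 then row ++ "\n" else row
      rows ++ [row])
    []
  String.join rows

-- ===== PRECONDITION & SPEC =====
def Spec_display_matrix (matrix : List Int) (out : String) : Prop := out = display_matrix_alt matrix
instance (matrix : List Int) (out : String) : Decidable (Spec_display_matrix matrix out) := by unfold Spec_display_matrix; infer_instance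

-- ===== CLAIM (what is proved, stated in full; the proofs are below) =====
def Claim_equal_display_matrix : Prop := ∀ (matrix : List Int), Dom_display_matrix matrix → Spec_display_matrix matrix (display_matrix matrix)

-- ===== LEMMAS AND PROOFS =====

-- one step of A's fold, abbreviated
def pvStepA (st : String × Int) (num : Int) : String × Int :=
  let output := st.1 ++ " " ++ PySem.Int.toStr num
  let (output, index) :=
    if st.2 = 3 then (output ++ "\n", (0 : Int)) else (output, st.2)
  (output, index + 1)

theorem display_matrix_eq_fold (m : List Int) :
    display_matrix m = (m.foldl pvStepA ("", 1)).1 := rfl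

-- the row a group of ≤3 elements produces
def pvRow (g : List Int) : String :=
  let row := String.join (g.map (fun n => " " ++ PySem.Int.toStr n))
  if g.length = 3 then row ++ "\n" else row

-- chunk-of-three recursion both programs are reduced to
def pvChunks : List Int → String
  | [] => ""
  | a :: t => pvRow ((a :: t).take 3) ++ pvChunks ((a :: t).drop 3)
termination_by m => m.length
decreasing_by simp [List.length_drop]

theorem pvJoin_foldl (l : List String) : ∀ (a b : String),
    l.foldl (· ++ ·) (a ++ b) = a ++ l.foldl (· ++ ·) b := by
  induction l with
  | nil => intro a b; rfl
  | cons x t ih => intro a b; simp only [List.foldl_cons, String.append_assoc, ih]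

theorem pvJoin_cons (s : String) (l : List String) :
    String.join (s :: l) = s ++ String.join l := by
  simp only [String.join, List.foldl_cons]
  simpa using pvJoin_foldl l s ""

theorem pvRange3_cons (n : Int) (h : 0 < n) :
    PySem.List.pyRange 0 n 3 = 0 :: (PySem.List.pyRange 0 (n - 3) 3).map (· + 3) := by
  rw [PySem.List.pyRange_of_pos 0 n (by norm_num), PySem.List.pyRange_of_pos 0 (n - 3) (by norm_num)]
  have hc : (if (0:Int) < n then ((n - 0 + 3 - 1) / 3).toNat else 0)
      = (if (0:Int) < n - 3 then ((n - 3 - 0 + 3 - 1) / 3).toNat else 0) + 1 := by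
    split_ifs <;> omega
  rw [hc, List.range_succ_eq_map]
  simp only [List.map_cons, List.map_map]
  congr 1

theorem pvSlice_shift (m : List Int) (i : Int) (hi : 0 ≤ i) :
    PySem.List.slice m (some (i + 3)) (some (i + 3 + 3))
      = PySem.List.slice (m.drop 3) (some i) (some (i + 3)) := by
  rw [PySem.List.slice_toNat m (by omega) (by omega),
      PySem.List.slice_toNat (m.drop 3) hi (by omega), List.drop_drop]
  have h1 : (i + 3 + 3).toNat - (i + 3).toNat = (i + 3).toNat - i.toNat := by omega
  have h2 : (i + 3).toNat = i.toNat + 3 := by omega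
  rw [h1, h2, Nat.add_comm]

theorem pvRangeShiftLen (n : Nat) :
    PySem.List.pyRange 0 ((n : Int) - 3) 3 = PySem.List.pyRange 0 ((n - 3 : Nat) : Int) 3 := by
  rw [PySem.List.pyRange_of_pos _ _ (by norm_num : (0:Int) < 3),
      PySem.List.pyRange_of_pos _ _ (by norm_num : (0:Int) < 3)]
  have : (if (0:Int) < (n : Int) - 3 then (((n : Int) - 3 - 0 + 3 - 1) / 3).toNat else 0)
      = (if (0:Int) < ((n - 3 : Nat) : Int) then ((((n - 3 : Nat) : Int) - 0 + 3 - 1) / 3).toNat else 0) := by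
    split_ifs <;> omega
  rw [this]

theorem pvAlt_eq_map (m : List Int) :
    display_matrix_alt m
      = String.join ((PySem.List.pyRange 0 (m.length : Int) 3).map
          (fun i => pvRow (PySem.List.slice m (some i) (some (i + 3))))) := by
  show String.join ((PySem.List.pyRange 0 (m.length : Int) 3).foldl
      (fun (rows : List String) i =>
        rows ++ [pvRow (PySem.List.slice m (some i) (some (i + 3)))]) []) = _
  rw [PySem.List.foldl_append_singleton_eq_map, List.nil_append]

theorem pvMapRows_eq (m : List Int) :
    String.join ((PySem.List.pyRange 0 (m.length : Int) 3).map
        (fun i => pvRow (PySem.List.slice m (some i) (some (i + 3))))) = pvChunks m := by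
  match m with
  | [] =>
    simp [PySem.List.pyRange, pvChunks, String.join]
  | a :: t =>
    have hlen : (0:Int) < ((a :: t).length : Int) := by
      exact_mod_cast Nat.succ_pos t.length
    rw [pvRange3_cons _ hlen, List.map_cons, List.map_map, pvJoin_cons]
    have h0 : PySem.List.slice (a :: t) (some 0) (some (0 + 3)) = (a :: t).take 3 := by
      rw [PySem.List.slice_toNat _ le_rfl (by norm_num)]
      simp
    have htail : ((PySem.List.pyRange 0 (((a :: t).length : Int) - 3) 3).map
          ((fun i => pvRow (PySem.List.slice (a :: t) (some i) (some (i + 3)))) ∘ (· + 3)))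
        = (PySem.List.pyRange 0 ((((a :: t).drop 3).length : Int)) 3).map
          (fun i => pvRow (PySem.List.slice ((a :: t).drop 3) (some i) (some (i + 3)))) := by
      rw [pvRangeShiftLen ((a :: t).length)]
      have hlen3 : ((a :: t).length - 3 : Nat) = ((a :: t).drop 3).length := by
        simp [List.length_drop]
      rw [hlen3]
      refine List.map_congr_left (fun i hi => ?_)
      have hpos : 0 ≤ i := by
        have := (PySem.List.mem_pyRange_iff_of_pos (by norm_num : (0:Int) < 3) i).1 hi
        omega
      simp only [Function.comp]
      rw [pvSlice_shift (a :: t) i hpos]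
    rw [htail, pvMapRows_eq ((a :: t).drop 3), h0]
    simp [pvChunks]
termination_by m.length
decreasing_by simp [List.length_drop]

-- A's loop, started at index 1 with any accumulated output, produces out ++ pvChunks m
theorem pvLoop_eq (m : List Int) (out : String) :
    (m.foldl pvStepA (out, 1)).1 = out ++ pvChunks m := by
  match m with
  | [] => simp [pvChunks]
  | [a] => simp [pvStepA, pvChunks, pvRow, String.join, String.append_assoc]
  | [a, b] => simp [pvStepA, pvChunks, pvRow, String.join, String.append_assoc]
  | a :: b :: c :: r =>
    have ih := pvLoop_eq r (out ++ " " ++ PySem.Int.toStr a ++ " " ++ PySem.Int.toStr b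
      ++ " " ++ PySem.Int.toStr c ++ "\n")
    simp only [List.foldl_cons, pvStepA] at ih ⊢
    norm_num at ih ⊢
    rw [ih]
    simp [pvChunks, pvRow, String.join, String.append_assoc]
termination_by m.length

-- ===== VERDICT (by name: the statement is the Claim_ definition above) =====
theorem display_matrix_spec : Claim_equal_display_matrix := by
  intro m _
  unfold Spec_display_matrix
  rw [display_matrix_eq_fold, pvLoop_eq, pvAlt_eq_map, pvMapRows_eq]
  simp
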